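-- pv_equiv track=rewrite | github.com/uditjainstjis/mewtwo | scripts/reformat_data_for_nemotron.py | extract_qa_from_qwen_format
-- ===== SOURCE A (Python) =====
-- def extract_qa_from_qwen_format(text):
--     """Extract user question and assistant answer from Qwen chat format."""
--     # Pattern: <|im_start|>role\ncontent<|im_end|>
--     user_msg = ""
--     assistant_msg = ""
--
--     parts = text.split("<|im_start|>")
--     for part in parts:
--         part = part.strip()
--         if part.startswith("user\n"):
--             content = part[len("user\n"):]
--             content = content.replace("<|im_end|>", "").strip()
--             user_msg = content
--         elif part.startswith("assistant\n"):
--             content = part[len("assistant\n"):]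
--             content = content.replace("<|im_end|>", "").strip()
--             assistant_msg = content
--
--     return user_msg, assistant_msg
-- ===== SOURCE B (Python) =====
-- def extract_qa_from_qwen_format(text):
--     """Extract user question and assistant answer from Qwen chat format."""
--     parts = text.split("<|im_start|>")
--
--     def last_content(prefix):
--         # scan back-to-front and stop at the first (i.e. last) matching block
--         for part in reversed(parts):
--             p = part.strip()
--             if p.startswith(prefix):
--                 return p[len(prefix):].replace("<|im_end|>", "").strip()
--         return ""
--
--     return last_content("user\n"), last_content("assistant\n")
-- ===== Notes on version B (the rewrite author's own statement) =====
-- stated objective: alternative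
-- what changed: Replaces the stateful forward fold that overwrites user_msg/assistant_msg with a back-to-front scan per role that returns at the first (i.e. last) matching block, with an early exit instead of accumulator overwriting.
import Mathlib
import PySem

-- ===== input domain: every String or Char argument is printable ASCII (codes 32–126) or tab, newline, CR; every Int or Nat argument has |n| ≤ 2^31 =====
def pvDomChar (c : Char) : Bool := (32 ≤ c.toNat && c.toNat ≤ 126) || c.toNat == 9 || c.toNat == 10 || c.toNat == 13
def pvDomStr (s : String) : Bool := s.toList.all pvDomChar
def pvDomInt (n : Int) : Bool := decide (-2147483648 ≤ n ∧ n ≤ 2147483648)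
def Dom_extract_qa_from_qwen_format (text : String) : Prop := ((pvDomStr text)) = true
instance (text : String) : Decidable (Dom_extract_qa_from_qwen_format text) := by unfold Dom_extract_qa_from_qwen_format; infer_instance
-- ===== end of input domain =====

-- B replaces A's stateful overwrite-as-you-go fold with a reversed scan per role that
-- returns at the first (= last) matching block (objective: alternative decomposition).

-- ===== PORT A =====
def pvStepA (st : String × String) (part0 : String) : String × String :=
  let part := PySem.Str.strip part0
  if PySem.Str.startswith part "user\n" then
    let content := PySem.Str.slice part (some 5) none
    let content := PySem.Str.strip (PySem.Str.replace content "<|im_end|>" "")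
    (content, st.2)
  else if PySem.Str.startswith part "assistant\n" then
    let content := PySem.Str.slice part (some 10) none
    let content := PySem.Str.strip (PySem.Str.replace content "<|im_end|>" "")
    (st.1, content)
  else st

def extract_qa_from_qwen_format (text : String) : String × String :=
  ((PySem.Str.split? text "<|im_start|>").getD []).foldl pvStepA ("", "")

-- ===== PORT B =====
def pvRoleContent (pre : String) (part : String) : Option String :=
  let p := PySem.Str.strip part
  if PySem.Str.startswith p pre then
    some (PySem.Str.strip
      (PySem.Str.replace (PySem.Str.slice p (some (PySem.Str.len pre : Int)) none) "<|im_end|>" ""))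
  else none

def pvLastContent (pre : String) : List String → String
  | [] => ""
  | part :: rest =>
    match pvRoleContent pre part with
    | some c => c
    | none => pvLastContent pre rest

def extract_qa_from_qwen_format_alt (text : String) : String × String :=
  let parts := ((PySem.Str.split? text "<|im_start|>").getD []).reverse
  (pvLastContent "user\n" parts, pvLastContent "assistant\n" parts)

-- ===== PRECONDITION & SPEC =====
def Spec_extract_qa_from_qwen_format (text : String) (out : String × String) : Prop := out = extract_qa_from_qwen_format_alt text
instance (text : String) (out : String × String) : Decidable (Spec_extract_qa_from_qwen_format text out) := by unfold Spec_extract_qa_from_qwen_format; infer_instance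

-- ===== CLAIM (what is proved, stated in full; the proofs are below) =====
def Claim_equal_extract_qa_from_qwen_format : Prop := ∀ (text : String), Dom_extract_qa_from_qwen_format text → Spec_extract_qa_from_qwen_format text (extract_qa_from_qwen_format text)

-- ===== LEMMAS AND PROOFS =====

-- a stripped part cannot start with both "user\n" and "assistant\n"
theorem pv_prefix_disjoint (p : String) :
    PySem.Str.startswith p "user\n" = true → PySem.Str.startswith p "assistant\n" = true → False := by
  intro h1 h2
  rw [PySem.Str.startswith_eq, PySem.Chars.startswith_iff] at h1 h2
  rcases h1 with ⟨t1, e1⟩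
  rcases h2 with ⟨t2, e2⟩
  have : ("user\n".toList ++ t1).head? = ("assistant\n".toList ++ t2).head? := by
    rw [e1, e2]
  simp at this

theorem pvStepA_eq (u a : String) (p : String) :
    pvStepA (u, a) p = ((pvRoleContent "user\n" p).getD u, (pvRoleContent "assistant\n" p).getD a) := by
  unfold pvStepA pvRoleContent
  dsimp only
  have hlen5 : (PySem.Str.len "user\n" : Int) = 5 := by decide
  have hlen10 : (PySem.Str.len "assistant\n" : Int) = 10 := by decide
  rw [hlen5, hlen10]
  split_ifs with h1 h2
  · exact absurd h2 (fun h => pv_prefix_disjoint _ h1 h)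
  · rfl
  · rfl
  · rfl

theorem pv_getD_or {α : Type} (o o' : Option α) (d : α) :
    (o.or o').getD d = o.getD (o'.getD d) := by
  cases o <;> rfl

theorem pv_key (parts : List String) : ∀ (u a : String),
    parts.foldl pvStepA (u, a) =
      ((parts.reverse.findSome? (pvRoleContent "user\n")).getD u,
       (parts.reverse.findSome? (pvRoleContent "assistant\n")).getD a) := by
  induction parts with
  | nil => intro u a; rfl
  | cons p ps ih =>
    intro u a
    have hsing : ∀ f : String → Option String, List.findSome? f [p] = f p := by
      intro f; cases h : f p <;> simp [List.findSome?, h]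
    rw [List.foldl_cons, pvStepA_eq, ih]
    simp only [List.reverse_cons, List.findSome?_append, hsing, pv_getD_or]

theorem pvLastContent_eq (pre : String) (l : List String) :
    pvLastContent pre l = (l.findSome? (pvRoleContent pre)).getD "" := by
  induction l with
  | nil => rfl
  | cons p ps ih =>
    simp only [pvLastContent, List.findSome?]
    cases pvRoleContent pre p <;> simp [ih]

-- ===== VERDICT (by name: the statement is the Claim_ definition above) =====
theorem extract_qa_from_qwen_format_spec : Claim_equal_extract_qa_from_qwen_format := by
  intro text _
  unfold Spec_extract_qa_from_qwen_format extract_qa_from_qwen_format extract_qa_from_qwen_format_alt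
  dsimp only
  rw [pv_key, pvLastContent_eq, pvLastContent_eq]
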